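-- pv_equiv track=rewrite | github.com/acrual/repotron | Unidad3_10/src/actividadUF3_10/programmingBlockchain3.py | knowPositions
-- ===== SOURCE A (Python) =====
-- def knowPositions(list, word1, word2, word3):
--     for i in range(len(list)):
--         if list[i] == word1:
--             position1 = i
--         if list[i] == word2:
--             position2 = i
--         if list[i] == word3:
--             position3 = i
--     return position1, position2, position3
-- ===== SOURCE B (Python) =====
-- def knowPositions(list, word1, word2, word3):
--     rev = list[::-1]
--     n = len(list)
--     return n - 1 - rev.index(word1), n - 1 - rev.index(word2), n - 1 - rev.index(word3)
-- ===== Notes on version B (the rewrite author's own statement) =====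
-- stated objective: alternative
-- what changed: B reverses the list once and answers each word with an early-exiting first-occurrence search (rev.index) mapped back to a forward index, instead of A's full forward pass maintaining three conditional last-seen variables.
import Mathlib
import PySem

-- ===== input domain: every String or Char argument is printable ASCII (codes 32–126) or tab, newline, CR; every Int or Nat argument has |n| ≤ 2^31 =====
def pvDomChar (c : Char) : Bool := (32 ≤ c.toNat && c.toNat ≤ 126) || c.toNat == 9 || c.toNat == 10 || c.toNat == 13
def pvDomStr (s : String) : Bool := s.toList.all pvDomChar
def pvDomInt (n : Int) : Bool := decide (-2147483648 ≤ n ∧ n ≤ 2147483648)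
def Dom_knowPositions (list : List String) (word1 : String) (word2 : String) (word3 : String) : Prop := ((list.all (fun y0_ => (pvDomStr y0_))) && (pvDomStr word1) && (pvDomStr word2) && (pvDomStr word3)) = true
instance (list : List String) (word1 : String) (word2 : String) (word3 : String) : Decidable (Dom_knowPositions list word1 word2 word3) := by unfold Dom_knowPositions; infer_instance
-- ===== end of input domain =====

-- B reverses the list once and finds each word by an early-exiting first-occurrence search in
-- the reversed list, mapped back to a forward index — instead of A's full forward pass
-- maintaining three conditional last-seen variables (objective: alternative).

-- ===== PORT A =====
-- A's loop over range(len(list)) with three independent conditional assignments; the three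
-- position variables are Option Int (none = still unbound). At the return, Python raises
-- UnboundLocalError when a variable is unbound — that case is excluded by Pre_; the port
-- uses .getD 0 there only to stay total.
def knowPositions (list : List String) (word1 : String) (word2 : String) (word3 : String) : Int × Int × Int :=
  let st := (PySem.List.pyRange 0 (PySem.List.len list) 1).foldl
    (fun (s : Option Int × Option Int × Option Int) i =>
      let x := PySem.List.pyGetD list i ""
      ((if x = word1 then some i else s.1),
       (if x = word2 then some i else s.2.1),
       (if x = word3 then some i else s.2.2)))
    (none, none, none)
  (st.1.getD 0, st.2.1.getD 0, st.2.2.getD 0)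

-- ===== PORT B =====
-- Source B: rev = list[::-1]; return n-1-rev.index(wk) for each word. Python's rev.index raises
-- ValueError on a missing word — excluded by Pre_; .getD 0 there only to stay total.
def knowPositions_alt (list : List String) (word1 : String) (word2 : String) (word3 : String) : Int × Int × Int :=
  let rev := (PySem.List.slice? list none none (-1)).getD []
  let n := PySem.List.len list
  (n - 1 - ((PySem.List.index? rev word1).getD 0 : Nat),
   n - 1 - ((PySem.List.index? rev word2).getD 0 : Nat),
   n - 1 - ((PySem.List.index? rev word3).getD 0 : Nat))

-- ===== PRECONDITION & SPEC =====
-- Exactly the inputs where Python A returns: each word occurs in the list (otherwise its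
-- position variable is unbound and A raises UnboundLocalError; B raises ValueError there).
def Pre_knowPositions (list : List String) (word1 : String) (word2 : String) (word3 : String) : Prop :=
  word1 ∈ list ∧ word2 ∈ list ∧ word3 ∈ list
instance (list : List String) (word1 : String) (word2 : String) (word3 : String) : Decidable (Pre_knowPositions list word1 word2 word3) := by unfold Pre_knowPositions; infer_instance

def pvWitness_knowPositions : List String × String × String × String := (["hi", "there", "you"], "there", "hi", "you")

def Spec_knowPositions (list : List String) (word1 : String) (word2 : String) (word3 : String) (out : Int × Int × Int) : Prop := out = knowPositions_alt list word1 word2 word3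
instance (list : List String) (word1 : String) (word2 : String) (word3 : String) (out : Int × Int × Int) : Decidable (Spec_knowPositions list word1 word2 word3 out) := by unfold Spec_knowPositions; infer_instance

-- ===== CLAIM (what is proved, stated in full; the proofs are below) =====
def Claim_equal_knowPositions : Prop := ∀ (list : List String) (word1 : String) (word2 : String) (word3 : String), Dom_knowPositions list word1 word2 word3 → Pre_knowPositions list word1 word2 word3 → Spec_knowPositions list word1 word2 word3 (knowPositions list word1 word2 word3)

-- ===== LEMMAS AND PROOFS =====

-- "last index" as a left fold over the enumerated list: the shape of A's loop per word.
def pvLast (L : List (Int × String)) (w : String) (init : Option Int) : Option Int :=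
  L.foldl (fun o p => if p.2 = w then some p.1 else o) init

-- A's triple fold splits into three independent pvLast folds.
theorem pvA_split (L : List (Int × String)) (w1 w2 w3 : String) (a b c : Option Int) :
    L.foldl (fun (s : Option Int × Option Int × Option Int) (p : Int × String) =>
      ((if p.2 = w1 then some p.1 else s.1),
       (if p.2 = w2 then some p.1 else s.2.1),
       (if p.2 = w3 then some p.1 else s.2.2))) (a, b, c)
    = (pvLast L w1 a, pvLast L w2 b, pvLast L w3 c) := by
  induction L generalizing a b c with
  | nil => rfl
  | cons p t ih => simp [pvLast, List.foldl_cons] at ih ⊢; exact ih _ _ _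

-- The last occurrence A records equals length - 1 - (first occurrence in the reversed list).
theorem pvLast_eq_rev_index (list : List String) (w : String) (hw : w ∈ list) :
    pvLast (PySem.List.enumerate list 0) w none
      = some ((list.length : Int) - 1 - ((PySem.List.index? list.reverse w).getD 0 : Nat)) := by
  induction list using List.reverseRecOn with
  | nil => cases hw
  | append_singleton xs x ih =>
    rw [PySem.List.enumerate_append]
    simp only [pvLast, List.foldl_append] at ih ⊢
    by_cases hx : x = w
    · subst hx
      rw [List.reverse_append, List.reverse_singleton, List.singleton_append,
        PySem.List.index?_cons_self]
      simp [PySem.List.enumerate]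
    · have hwxs : w ∈ xs := by
        rcases List.mem_append.mp hw with h | h
        · exact h
        · simp at h; exact absurd h.symm hx
      rw [List.reverse_append, List.reverse_singleton, List.singleton_append,
        PySem.List.index?_cons_of_ne (h := hx)]
      obtain ⟨k, hk⟩ := Option.isSome_iff_exists.mp
        ((PySem.List.index?_isSome_iff (xs := xs.reverse) (v := w)).mpr (by simpa using hwxs))
      rw [hk] at ih ⊢
      simp only [PySem.List.enumerate, List.foldl_cons, List.foldl_nil, if_neg hx]
      rw [ih hwxs]
      simp
      ring

-- ===== VERDICT (by name: the statement is the Claim_ definition above) =====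
theorem knowPositions_spec : Claim_equal_knowPositions := by
  intro list word1 word2 word3 _ hpre
  show knowPositions list word1 word2 word3 = knowPositions_alt list word1 word2 word3
  unfold knowPositions knowPositions_alt
  rw [PySem.List.slice?_none_none_neg_one]
  rw [show (PySem.List.pyRange 0 (PySem.List.len list) 1).foldl
        (fun (s : Option Int × Option Int × Option Int) i =>
          let x := PySem.List.pyGetD list i ""
          ((if x = word1 then some i else s.1),
           (if x = word2 then some i else s.2.1),
           (if x = word3 then some i else s.2.2)))
        (none, none, none)
      = (PySem.List.enumerate list 0).foldl
        (fun (s : Option Int × Option Int × Option Int) (p : Int × String) =>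
          ((if p.2 = word1 then some p.1 else s.1),
           (if p.2 = word2 then some p.1 else s.2.1),
           (if p.2 = word3 then some p.1 else s.2.2))) (none, none, none)
      from by rw [PySem.List.enumerate_eq_map_pyRange list ""]; rw [List.foldl_map]]
  rw [pvA_split,
    pvLast_eq_rev_index list word1 hpre.1,
    pvLast_eq_rev_index list word2 hpre.2.1,
    pvLast_eq_rev_index list word3 hpre.2.2]
  simp [PySem.List.len]
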